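-- pv_equiv track=rewrite | github.com/Mikato233/cs61a-fall2021 | Code/15_Syntax_ChangeDataAbstraction.py | branches
-- ===== SOURCE A (Python) =====
-- def branches(t):
--     if is_leaf(t):
--         return []
--     branch = []
--     branches = []
--     opened = 1
--     for token in t[2:]:
--         branch.append(token)
--         if token == '(':
--             opened += 1
--         if token == ')':
--             opened -= 1
--             if opened == 1:
--                 branches.append(branch)
--                 branch = []
--     return branches
--
-- def is_leaf(t):
--     return len(t) == 4
-- ===== SOURCE B (Python) =====
-- def branches(t):
--     if len(t) == 4:
--         return []
--     return _split(list(t[2:]))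
--
-- def _split(s):
--     bal = 0
--     for i, tok in enumerate(s):
--         if tok == '(':
--             bal += 1
--         elif tok == ')':
--             bal -= 1
--             if bal == 0:
--                 return [s[:i+1]] + _split(s[i+1:])
--     return []
-- ===== Notes on version B (the rewrite author's own statement) =====
-- stated objective: alternative
-- what changed: A makes one scan with three mutable accumulators (pending branch, branch list, opened counter); B recursively cuts off the first prefix ending in a closing parenthesis that brings the running balance to zero and recurses on the remaining tokens, so no cross-branch state survives.
import Mathlib
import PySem

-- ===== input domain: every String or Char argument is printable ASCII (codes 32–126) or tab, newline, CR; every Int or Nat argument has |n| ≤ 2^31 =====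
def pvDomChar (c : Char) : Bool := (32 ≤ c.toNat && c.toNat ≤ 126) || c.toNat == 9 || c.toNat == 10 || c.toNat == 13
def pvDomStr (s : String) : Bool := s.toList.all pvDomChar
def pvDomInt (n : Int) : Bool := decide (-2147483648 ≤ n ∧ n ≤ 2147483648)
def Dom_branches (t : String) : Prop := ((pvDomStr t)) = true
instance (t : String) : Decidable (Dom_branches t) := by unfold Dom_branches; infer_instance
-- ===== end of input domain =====

-- B replaces A's single scan with three mutable accumulators by a recursive decomposition:
-- cut off the first prefix ending in a closing parenthesis that zeroes the balance, keep it as one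
-- branch, and recurse on the remaining tokens (objective: alternative, same cost).

-- ===== PORT A =====
-- A's for-loop, state (branch, branches, opened); tokens of a Python str are 1-char strings
def branchesLoopA : List Char → List String → List (List String) → Int → List (List String)
  | [], _branch, bs, _opened => bs
  | c :: rest, branch, bs, opened =>
      let branch := branch ++ [String.ofList [c]]
      let opened := if c = '(' then opened + 1 else opened
      if c = ')' then
        (if opened - 1 = 1 then branchesLoopA rest [] (bs ++ [branch]) (opened - 1)
         else branchesLoopA rest branch bs (opened - 1))
      else branchesLoopA rest branch bs opened

def branches (t : String) : List (List String) :=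
  if t.toList.length = 4 then [] else branchesLoopA (t.toList.drop 2) [] [] 1

-- ===== PORT B =====
-- B's inner for-loop: first token ')' at which the running balance hits 0 splits the list
def findCut : List String → Int → List String → Option (List String × List String)
  | [], _bal, _pre => none
  | tok :: rest, bal, pre =>
      if tok = "(" then findCut rest (bal + 1) (pre ++ [tok])
      else if tok = ")" then
        (if bal - 1 = 0 then some (pre ++ [tok], rest)
         else findCut rest (bal - 1) (pre ++ [tok]))
      else findCut rest bal (pre ++ [tok])

theorem findCut_rest_lt : ∀ (s : List String) (bal : Int) (pre b r : List String),
    findCut s bal pre = some (b, r) → r.length < s.length := by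
  intro s
  induction s with
  | nil => intro bal pre b r h; simp [findCut] at h
  | cons tok rest ih =>
      intro bal pre b r h
      simp only [findCut] at h
      split_ifs at h with h1 h2 h3
      · exact Nat.lt_succ_of_lt (ih _ _ _ _ h)
      · simp at h; simp [← h.2]
      · exact Nat.lt_succ_of_lt (ih _ _ _ _ h)
      · exact Nat.lt_succ_of_lt (ih _ _ _ _ h)

def splitB (s : List String) : List (List String) :=
  match hc : findCut s 0 [] with
  | none => []
  | some (b, r) => b :: splitB r
termination_by s.length
decreasing_by exact findCut_rest_lt _ _ _ _ _ hc

def branches_alt (t : String) : List (List String) :=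
  if t.toList.length = 4 then []
  else splitB ((t.toList.drop 2).map (fun c => String.ofList [c]))

-- ===== PRECONDITION & SPEC =====
def Spec_branches (t : String) (out : List (List String)) : Prop := out = branches_alt t
instance (t : String) (out : List (List String)) : Decidable (Spec_branches t out) := by unfold Spec_branches; infer_instance

-- ===== CLAIM (what is proved, stated in full; the proofs are below) =====
def Claim_equal_branches : Prop := ∀ (t : String), Dom_branches t → Spec_branches t (branches t)

-- ===== LEMMAS AND PROOFS =====

theorem sing_inj (c d : Char) : String.ofList [c] = String.ofList [d] ↔ c = d := by
  constructor
  · intro h; have := congrArg String.toList h; simpa using this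
  · intro h; rw [h]

theorem sing_eq_lparen (c : Char) : (String.ofList [c] = "(") ↔ c = '(' := by
  rw [show ("(" : String) = String.ofList ['('] from rfl, sing_inj]

theorem sing_eq_rparen (c : Char) : (String.ofList [c] = ")") ↔ c = ')' := by
  rw [show (")" : String) = String.ofList [')'] from rfl, sing_inj]

theorem splitB_eq (s : List String) :
    splitB s = match findCut s 0 [] with | none => [] | some (b, r) => b :: splitB r := by
  rw [splitB]; rcases h : findCut s 0 [] with _ | ⟨b, r⟩ <;> simp [h]

-- loop/recursion correspondence: A's loop with pending branch `pre`, accumulator `bs` and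
-- opened = bal + 1 equals bs followed by the branches B's recursion still produces.
theorem loop_eq_split : ∀ (s : List Char) (pre : List String) (bs : List (List String)) (bal : Int),
    branchesLoopA s pre bs (bal + 1) =
      bs ++ (match findCut (s.map (fun c => String.ofList [c])) bal pre with
             | none => []
             | some (b, r) => b :: splitB r) := by
  intro s
  induction s with
  | nil => intro pre bs bal; simp [branchesLoopA, findCut]
  | cons c rest ih =>
      intro pre bs bal
      by_cases hop : c = '('
      · subst hop
        simp only [branchesLoopA, List.map_cons, findCut, reduceIte]
        exact ih _ bs (bal + 1)
      · by_cases hcl : c = ')'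
        · subst hcl
          simp only [branchesLoopA, List.map_cons, findCut, reduceIte]
          rw [if_neg hop, if_neg (show ¬(String.ofList [')'] = "(") from by decide)]
          by_cases hb : bal - 1 = 0
          · rw [if_pos (show bal + 1 - 1 = 1 by omega), if_pos hb]
            rw [show bal + 1 - 1 = (0 : Int) + 1 by omega,
                ih [] (bs ++ [pre ++ [String.ofList [')']]]) 0]
            simp [splitB_eq ((List.map (fun c => String.ofList [c]) rest))]
          · rw [if_neg (show ¬(bal + 1 - 1 = 1) by omega), if_neg hb]
            rw [show bal + 1 - 1 = (bal - 1) + 1 by omega]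
            exact ih _ bs (bal - 1)
        · simp only [branchesLoopA, List.map_cons, findCut]
          rw [if_neg hcl, if_neg hop,
              if_neg (mt (sing_eq_lparen c).mp hop), if_neg (mt (sing_eq_rparen c).mp hcl)]
          exact ih _ bs bal

-- ===== VERDICT (by name: the statement is the Claim_ definition above) =====
theorem branches_spec : Claim_equal_branches := by
  intro t _
  unfold Spec_branches branches branches_alt
  by_cases h : t.toList.length = 4
  · simp [h]
  · rw [if_neg h, if_neg h, splitB_eq]
    have h1 := loop_eq_split (t.toList.drop 2) [] [] 0
    rw [List.nil_append] at h1
    exact h1
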